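-- pv_equiv track=rewrite | github.com/Iago-Boardy/python-exercises | day-7-hangman-game/love_calculator.py | calculate_love_score
-- ===== SOURCE A (Python) =====
-- def calculate_love_score(n1, n2):
--     names = (n1.upper() + n2.upper()).replace(" ", "")
--     value1 = 0
--     value2 = 0
--     for i in names:
--         if i in "TRUE":
--             value1 += 1
--         if i in "LOVE":
--             value2 += 1
--
--     return str(value1) + str(value2)
-- ===== SOURCE B (Python) =====
-- def calculate_love_score(n1, n2):
--     names = (n1.upper() + n2.upper()).replace(" ", "")
--     freq = {}
--     for c in names:
--         freq[c] = freq.get(c, 0) + 1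
--     value1 = sum(freq.get(c, 0) for c in "TRUE")
--     value2 = sum(freq.get(c, 0) for c in "LOVE")
--     return str(value1) + str(value2)
-- ===== Notes on version B (the rewrite author's own statement) =====
-- stated objective: alternative
-- what changed: Replaces the single scan with two per-character membership tests by a frequency-table build pass followed by a lookup pass over the four target letters of each of 'TRUE' and 'LOVE'.
import Mathlib
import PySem

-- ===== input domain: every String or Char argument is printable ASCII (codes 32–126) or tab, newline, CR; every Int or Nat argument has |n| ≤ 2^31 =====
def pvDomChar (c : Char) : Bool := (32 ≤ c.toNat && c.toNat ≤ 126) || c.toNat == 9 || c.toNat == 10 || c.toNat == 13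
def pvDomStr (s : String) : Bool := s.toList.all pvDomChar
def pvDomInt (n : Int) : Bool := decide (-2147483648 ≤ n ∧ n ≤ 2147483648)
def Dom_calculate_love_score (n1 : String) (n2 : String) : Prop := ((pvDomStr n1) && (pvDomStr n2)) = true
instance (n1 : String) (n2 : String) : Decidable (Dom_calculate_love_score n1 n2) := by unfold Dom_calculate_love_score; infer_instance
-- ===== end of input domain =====

-- B builds a character-frequency table in one pass and then sums the lookups of the
-- four target letters of 'TRUE' and of 'LOVE' (alternative shape, same cost).

-- ===== PORT A =====
-- single scan over the combined name, two membership tests per character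
-- (char membership 'i in "TRUE"' ported as list membership of the code point — exact for 1-char needles)
def calculate_love_score (n1 : String) (n2 : String) : String :=
  let names : List Char :=
    PySem.Chars.replace (PySem.Str.upper n1 ++ PySem.Str.upper n2).toList " ".toList "".toList
  let p := names.foldl (fun (vp : Int × Int) i =>
      (if "TRUE".toList.contains i then vp.1 + 1 else vp.1,
       if "LOVE".toList.contains i then vp.2 + 1 else vp.2)) ((0 : Int), (0 : Int))
  PySem.Int.toStr p.1 ++ PySem.Int.toStr p.2

-- ===== PORT B =====
-- frequency dict built once ('freq[c] = freq.get(c, 0) + 1'), then lookup passes over the targets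
def calculate_love_score_alt (n1 : String) (n2 : String) : String :=
  let names : List Char :=
    PySem.Chars.replace (PySem.Str.upper n1 ++ PySem.Str.upper n2).toList " ".toList "".toList
  let freq := names.foldl (fun (d : PySem.Dict Char Int) c => d.insert c (d.getD c 0 + 1)) PySem.Dict.empty
  let value1 := ("TRUE".toList.map (fun c => freq.getD c 0)).sum
  let value2 := ("LOVE".toList.map (fun c => freq.getD c 0)).sum
  PySem.Int.toStr value1 ++ PySem.Int.toStr value2

-- ===== PRECONDITION & SPEC =====
def Spec_calculate_love_score (n1 : String) (n2 : String) (out : String) : Prop := out = calculate_love_score_alt n1 n2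
instance (n1 : String) (n2 : String) (out : String) : Decidable (Spec_calculate_love_score n1 n2 out) := by unfold Spec_calculate_love_score; infer_instance

-- ===== CLAIM (what is proved, stated in full; the proofs are below) =====
def Claim_equal_calculate_love_score : Prop := ∀ (n1 : String) (n2 : String), Dom_calculate_love_score n1 n2 → Spec_calculate_love_score n1 n2 (calculate_love_score n1 n2)

-- ===== LEMMAS AND PROOFS =====

-- the sum of per-letter counts over a duplicate-free target equals the membership count
theorem sum_indicator_zero (t : List Char) (x : Char) (hx : x ∉ t) :
    (t.map (fun c => if c = x then (1:Int) else 0)).sum = 0 := by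
  apply List.sum_eq_zero
  intro v hv
  obtain ⟨c, hc, rfl⟩ := List.mem_map.mp hv
  have : c ≠ x := fun h => hx (h ▸ hc)
  simp [this]

theorem sum_indicator_one (t : List Char) (ht : t.Nodup) (x : Char) (hx : x ∈ t) :
    (t.map (fun c => if c = x then (1:Int) else 0)).sum = 1 := by
  induction t with
  | nil => cases hx
  | cons a t ih =>
    rcases List.nodup_cons.mp ht with ⟨ha, ht'⟩
    rcases List.mem_cons.mp hx with rfl | hx'
    · simp [sum_indicator_zero t x ha]
    · have : a ≠ x := fun h => ha (h ▸ hx')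
      simp [this, ih ht' hx']

theorem sum_counts_eq_countP (t : List Char) (ht : t.Nodup) (l : List Char) :
    (t.map (fun c => (l.count c : Int))).sum = (l.countP (fun i => t.contains i) : Int) := by
  induction l with
  | nil => simp
  | cons x l ih =>
    rw [List.countP_cons]
    by_cases hx : t.contains x
    · have hx' : x ∈ t := by simpa using hx
      simp only [hx]
      calc (t.map (fun c => ((x :: l).count c : Int))).sum
          = (t.map (fun c => (l.count c : Int) + if c = x then 1 else 0)).sum := by
            apply congrArg; apply List.map_congr_left; intro c _
            by_cases hcx : c = x
            · subst hcx; simp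
            · have : x ≠ c := fun h => hcx h.symm
              simp [this, hcx]
        _ = (t.map (fun c => (l.count c : Int))).sum + (t.map (fun c => if c = x then (1:Int) else 0)).sum := by
            rw [← List.sum_map_add]
        _ = (l.countP (fun i => t.contains i) : Int) + 1 := by
            rw [ih, sum_indicator_one t ht x hx']
        _ = _ := by push_cast; ring
    · have hx' : x ∉ t := by simpa using hx
      simp only [hx]
      calc (t.map (fun c => ((x :: l).count c : Int))).sum
          = (t.map (fun c => (l.count c : Int))).sum := by
            apply congrArg; apply List.map_congr_left; intro c hc
            have hne : x ≠ c := fun h => hx' (h ▸ hc)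
            simp [hne]
        _ = _ := by rw [ih]; simp

-- ===== VERDICT (by name: the statement is the Claim_ definition above) =====
theorem calculate_love_score_spec : Claim_equal_calculate_love_score := by
  intro n1 n2 _
  unfold Spec_calculate_love_score calculate_love_score calculate_love_score_alt
  generalize (PySem.Chars.replace (PySem.Str.upper n1 ++ PySem.Str.upper n2).toList " ".toList "".toList) = l
  dsimp only
  rw [PySem.List.foldl_prod_mk (f := fun (a : Int) i => if "TRUE".toList.contains i then a + 1 else a)
      (g := fun (a : Int) i => if "LOVE".toList.contains i then a + 1 else a)]
  rw [PySem.List.foldl_if_add_one, PySem.List.foldl_if_add_one]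
  have hget : ∀ c : Char,
      (l.foldl (fun (d : PySem.Dict Char Int) c => d.insert c (d.getD c 0 + 1)) PySem.Dict.empty).getD c 0
        = (l.count c : Int) := by
    intro c
    rw [PySem.Dict.getD_foldl_insert_add_one]
    simp [PySem.Dict.empty, PySem.Dict.getD, PySem.Dict.get?]
  simp only [hget]
  rw [sum_counts_eq_countP _ (by decide), sum_counts_eq_countP _ (by decide)]
  simp only [zero_add]
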